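-- pv_equiv track=rewrite | github.com/dogfish000/Algorithm | 프로그래머스/2/12973. 짝지어 제거하기/짝지어 제거하기.py | solution
-- ===== SOURCE A (Python) =====
-- def solution(s):
--
--     stack = []
--
--     for st in s:
--         if not stack:
--             stack.append(st)
--         else:
--             if st == stack[-1]:
--                 stack.pop()
--             else:
--                 stack.append(st)
--
--     if stack:
--         return 0
--
--     else:
--         return 1
-- ===== SOURCE B (Python) =====
-- def solution(s):
--     t = list(s)
--     while True:
--         for i in range(len(t) - 1):
--             if t[i] == t[i + 1]:
--                 del t[i:i + 2]
--                 break
--         else: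
--             return 1 if not t else 0
-- ===== Notes on version B (the rewrite author's own statement) =====
-- stated objective: alternative
-- what changed: Replaces the single-pass stack with a fixed-point reduction that repeatedly deletes the first adjacent equal pair until none remains, then checks emptiness (correct by confluence of pair cancellation).
import Mathlib
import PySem

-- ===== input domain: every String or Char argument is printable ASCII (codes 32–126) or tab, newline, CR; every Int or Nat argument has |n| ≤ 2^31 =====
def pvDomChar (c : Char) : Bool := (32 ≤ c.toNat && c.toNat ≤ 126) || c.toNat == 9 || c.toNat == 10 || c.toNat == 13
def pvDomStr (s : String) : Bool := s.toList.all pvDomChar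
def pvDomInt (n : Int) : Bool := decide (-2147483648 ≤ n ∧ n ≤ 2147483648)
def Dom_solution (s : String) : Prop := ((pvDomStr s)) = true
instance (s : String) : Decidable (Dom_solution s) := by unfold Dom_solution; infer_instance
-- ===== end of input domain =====

-- B replaces A's single stack pass by a fixed-point loop that deletes the first adjacent
-- equal pair until none remains, then checks emptiness; an alternative (not faster) algorithm.

-- ===== PORT A =====
-- stack step of A: append if empty, pop if the new char equals the top, else append
-- (Python appends/pops at the END of the list, so the port does too: getLast!/dropLast)
def stepA (stack : List Char) (st : Char) : List Char :=
  if stack.isEmpty then stack ++ [st]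
  else if st = stack.getLast! then stack.dropLast
  else stack ++ [st]

def solution (s : String) : Int :=
  let stack := s.toList.foldl stepA []
  if !stack.isEmpty then 0 else 1

-- ===== PORT B =====
-- find the first adjacent equal pair: some (prefix, c, suffix) with l = prefix ++ c::c::suffix
def splitPair : List Char → Option (List Char × Char × List Char)
  | [] => none
  | [_] => none
  | a :: b :: t =>
    if a = b then some ([], a, t)
    else (splitPair (b :: t)).map (fun p => (a :: p.1, p.2.1, p.2.2))

theorem splitPair_some_eq : ∀ (l u : List Char) (c : Char) (v : List Char),
    splitPair l = some (u, c, v) → l = u ++ c :: c :: v := by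
  intro l
  induction l with
  | nil => intro u c v h; simp [splitPair] at h
  | cons a t ih =>
    intro u c v h
    match t with
    | [] => simp [splitPair] at h
    | b :: t' =>
      by_cases hab : a = b
      · simp [splitPair, hab] at h
        obtain ⟨h1, h2, h3⟩ := h
        simp [← h1, ← h2, ← h3, hab]
      · cases hs : splitPair (b :: t') with
        | none => rw [splitPair, if_neg hab, hs] at h; simp at h
        | some p =>
          obtain ⟨u', c', v'⟩ := p
          rw [splitPair, if_neg hab, hs] at h
          simp only [Option.map_some, Option.some.injEq, Prod.mk.injEq] at h
          obtain ⟨h1, h2, h3⟩ := h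
          rw [← h1, ← h2, ← h3]
          simpa using congrArg (a :: ·) (ih u' c' v' hs)

-- repeatedly delete the first adjacent equal pair until none remains
def reduceB (l : List Char) : List Char :=
  match h : splitPair l with
  | none => l
  | some (u, c, v) => reduceB (u ++ v)
termination_by l.length
decreasing_by
  have heq := splitPair_some_eq l u c v h
  simp only [heq, List.length_append, List.length_cons]
  omega

def solution_alt (s : String) : Int :=
  if reduceB s.toList = [] then 1 else 0

-- ===== PRECONDITION & SPEC =====
def Spec_solution (s : String) (out : Int) : Prop := out = solution_alt s
instance (s : String) (out : Int) : Decidable (Spec_solution s out) := by unfold Spec_solution; infer_instance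

-- ===== CLAIM (what is proved, stated in full; the proofs are below) =====
def Claim_equal_solution : Prop := ∀ (s : String), Dom_solution s → Spec_solution s (solution s)

-- ===== LEMMAS AND PROOFS =====

theorem reduceB_eq_none (l : List Char) (h : splitPair l = none) : reduceB l = l := by
  unfold reduceB; split <;> simp_all

theorem reduceB_eq_some (l u : List Char) (c : Char) (v : List Char)
    (h : splitPair l = some (u, c, v)) : reduceB l = reduceB (u ++ v) := by
  conv_lhs => unfold reduceB
  split <;> simp_all

-- head-first stack step (top of stack at the head); A's step is this on the reversed stack
def stepH (st : List Char) (c : Char) : List Char :=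
  match st with
  | [] => [c]
  | t :: r => if c = t then r else c :: t :: r

def runH (st : List Char) (l : List Char) : List Char := l.foldl stepH st

theorem stepA_eq_reverse (stack : List Char) (c : Char) :
    stepA stack c = (stepH stack.reverse c).reverse := by
  induction stack using List.reverseRecOn with
  | nil => simp [stepA, stepH]
  | append_singleton st' x _ =>
    by_cases hc : c = x <;>
      simp [stepA, stepH, hc]

theorem foldl_stepA_reverse (l : List Char) : ∀ (stack : List Char),
    l.foldl stepA stack = (runH stack.reverse l).reverse := by
  induction l with
  | nil => intro stack; simp [runH]
  | cons a t ih =>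
    intro stack
    simp only [List.foldl_cons, runH, ih, stepA_eq_reverse]
    simp only [List.reverse_reverse]

-- a stack produced by stepH from a reduced stack stays reduced (no adjacent equal chars)
theorem stepH_chain (st : List Char) (c : Char) (h : List.IsChain (· ≠ ·) st) :
    List.IsChain (· ≠ ·) (stepH st c) := by
  match st with
  | [] => exact .singleton _
  | t :: r =>
    simp only [stepH]
    split_ifs with hc
    · exact h.tail
    · exact List.isChain_cons_cons.mpr ⟨hc, h⟩

theorem runH_chain (l : List Char) : ∀ (st : List Char), List.IsChain (· ≠ ·) st →
    List.IsChain (· ≠ ·) (runH st l) := by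
  induction l with
  | nil => intro st h; simpa [runH] using h
  | cons a t ih => intro st h; exact ih _ (stepH_chain st a h)

-- two equal chars in a row cancel on a reduced stack
theorem stepH_stepH (st : List Char) (c : Char) (h : List.IsChain (· ≠ ·) st) :
    stepH (stepH st c) c = st := by
  match st with
  | [] => simp [stepH]
  | t :: r =>
    by_cases hc : c = t
    · subst hc
      match r with
      | [] => simp [stepH]
      | x :: r' =>
        have hne : c ≠ x := (List.isChain_cons_cons.mp h).1
        simp [stepH, hne]
    · simp [stepH, hc]

-- deleting an adjacent equal pair does not change the final stack
theorem runH_cancel (u : List Char) (c : Char) (v : List Char) :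
    runH [] (u ++ c :: c :: v) = runH [] (u ++ v) := by
  have hred : List.IsChain (· ≠ ·) (runH ([] : List Char) u) :=
    runH_chain u [] .nil
  simp only [runH, List.foldl_append, List.foldl_cons]
  rw [show stepH (stepH (List.foldl stepH [] u) c) c = List.foldl stepH [] u from
    stepH_stepH _ c hred]

-- splitPair finds nothing exactly on reduced lists
theorem splitPair_none_chain : ∀ (l : List Char), splitPair l = none →
    List.IsChain (· ≠ ·) l := by
  intro l
  induction l with
  | nil => intro _; exact .nil
  | cons a t ih =>
    intro h
    match t with
    | [] => exact .singleton _
    | b :: t' =>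
      by_cases hab : a = b
      · simp [splitPair, hab] at h
      · rw [splitPair, if_neg hab] at h
        have : splitPair (b :: t') = none := by
          cases hs : splitPair (b :: t') with
          | none => rfl
          | some p => rw [hs] at h; simp at h
        exact List.isChain_cons_cons.mpr ⟨hab, ih this⟩

-- the stack run on a reduced list is its reverse (so nonempty for nonempty input)
theorem runH_of_chain (l : List Char) (h : List.IsChain (· ≠ ·) l) :
    runH [] l = l.reverse := by
  match l with
  | [] => simp [runH]
  | a :: t =>
    suffices H : ∀ (t : List Char) (a : Char) (st : List Char),
        List.IsChain (· ≠ ·) (a :: t) → runH (a :: st) t = t.reverse ++ a :: st by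
      have := H t a [] h
      simpa [runH, List.foldl_cons, stepH] using this
    intro t
    induction t with
    | nil => intro a st _; simp [runH]
    | cons b t' ih =>
      intro a st hch
      have hne : a ≠ b := (List.isChain_cons_cons.mp hch).1
      have hstep : runH (a :: st) (b :: t') = runH (b :: a :: st) t' := by
        simp [runH, List.foldl_cons, stepH, Ne.symm hne]
      rw [hstep, ih b (a :: st) (List.isChain_cons_cons.mp hch).2]
      simp

-- the stack run is invariant under B's whole reduction, and the result is reduced
theorem reduceB_props : ∀ (n : Nat) (l : List Char), l.length ≤ n →
    runH [] (reduceB l) = runH [] l ∧ splitPair (reduceB l) = none := by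
  intro n
  induction n with
  | zero =>
    intro l hl
    have : l = [] := List.length_eq_zero_iff.mp (Nat.le_zero.mp hl)
    subst this
    rw [reduceB_eq_none [] rfl]
    exact ⟨rfl, rfl⟩
  | succ n ih =>
    intro l hl
    cases h : splitPair l with
    | none => rw [reduceB_eq_none l h]; exact ⟨rfl, h⟩
    | some p =>
      obtain ⟨u, c, v⟩ := p
      have heq := splitPair_some_eq l u c v h
      have hlen : (u ++ v).length ≤ n := by
        have : l.length = (u ++ v).length + 2 := by simp [heq]; omega
        omega
      obtain ⟨h1, h2⟩ := ih (u ++ v) hlen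
      rw [reduceB_eq_some l u c v h]
      exact ⟨by rw [h1, heq, runH_cancel], h2⟩

theorem runH_empty_iff (l : List Char) : runH [] l = [] ↔ reduceB l = [] := by
  obtain ⟨h1, h2⟩ := reduceB_props l.length l (le_refl _)
  constructor
  · intro h
    have hch := splitPair_none_chain _ h2
    have hrev := runH_of_chain _ hch
    rw [← h1, hrev] at h
    simpa using h
  · intro h
    rw [← h1, h]
    rfl

-- ===== VERDICT (by name: the statement is the Claim_ definition above) =====
theorem solution_spec : Claim_equal_solution := by
  intro s _
  unfold Spec_solution solution solution_alt
  rw [foldl_stepA_reverse]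
  simp only [List.reverse_nil]
  by_cases h : runH [] s.toList = []
  · rw [(runH_empty_iff _).mp h]
    simp [h]
  · have hne : reduceB s.toList ≠ [] := fun hc => h ((runH_empty_iff _).mpr hc)
    simp [h, hne]
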